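-- pv_equiv track=rewrite | github.com/YuriSpiridonov/LeetCode | Medium/1457.Pseudo-PalindromicPathsinaBinaryTree.py | pathCheck
-- ===== SOURCE A (Python) =====
-- def pathCheck(path):
--     count = {}
--     odd = 0
--     for val in path:
--         if val not in count:
--             count[val] = 0
--         count[val] += 1
--     for value in count.values():
--         if value % 2:
--             odd += 1
--         if odd > 1:
--             return False
--     return True
-- ===== SOURCE B (Python) =====
-- def pathCheck(path):
--     seen = set()
--     for val in path:
--         if val in seen:
--             seen.discard(val)
--         else:
--             seen.add(val)
--     return len(seen) <= 1
-- ===== Notes on version B (the rewrite author's own statement) =====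
-- stated objective: idiomatic
-- what changed: Replaces the frequency dict plus a second odd-counting scan with a single pass that toggles each value in a parity set and then checks the set holds at most one element.
import Mathlib
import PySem

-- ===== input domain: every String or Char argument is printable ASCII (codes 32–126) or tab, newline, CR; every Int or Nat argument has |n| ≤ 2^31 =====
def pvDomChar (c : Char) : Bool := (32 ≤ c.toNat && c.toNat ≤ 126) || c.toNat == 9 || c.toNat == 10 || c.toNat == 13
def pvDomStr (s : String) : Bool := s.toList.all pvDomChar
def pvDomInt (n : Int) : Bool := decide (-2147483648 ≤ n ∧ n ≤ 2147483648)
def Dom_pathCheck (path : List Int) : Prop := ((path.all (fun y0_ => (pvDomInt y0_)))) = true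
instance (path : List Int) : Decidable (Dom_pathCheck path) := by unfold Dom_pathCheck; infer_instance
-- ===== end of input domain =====

-- B replaces A's frequency dict plus second odd-counting scan by a single pass toggling
-- each value in a parity set, then checks the set has at most one element (idiomatic, same cost).

-- ===== PORT A =====
-- second loop of A: 'for value in count.values(): …' with early return
def pathCheckLoop (odd : Int) : List Int → Bool
  | [] => true
  | value :: rest =>
    let odd' := if PySem.Int.mod value 2 ≠ 0 then odd + 1 else odd
    if odd' > 1 then false else pathCheckLoop odd' rest

def pathCheck (path : List Int) : Bool :=
  let count := path.foldl
    (fun d val =>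
      let d' := if d.contains val then d else d.insert val 0
      d'.modify val 0 (· + 1))
    PySem.Dict.empty
  pathCheckLoop 0 count.values

-- ===== PORT B =====
def pathCheck_alt (path : List Int) : Bool :=
  let seen := path.foldl
    (fun s val =>
      if PySem.Set.contains s val then PySem.Set.discard s val else PySem.Set.add s val)
    PySem.Set.empty
  decide (PySem.Set.len seen ≤ 1)

-- ===== PRECONDITION & SPEC =====
def Spec_pathCheck (path : List Int) (out : Bool) : Prop := out = pathCheck_alt path
instance (path : List Int) (out : Bool) : Decidable (Spec_pathCheck path out) := by unfold Spec_pathCheck; infer_instance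

-- ===== CLAIM (what is proved, stated in full; the proofs are below) =====
def Claim_equal_pathCheck : Prop := ∀ (path : List Int), Dom_pathCheck path → Spec_pathCheck path (pathCheck path)

-- ===== LEMMAS AND PROOFS =====

-- A's 'if val not in count: count[val] = 0; count[val] += 1' is one Counter update
theorem ins_modify (d : PySem.Dict Int Int) (v : Int) :
    ((if d.contains v then d else d.insert v 0).modify v 0 (· + 1)) = d.modify v 0 (· + 1) := by
  by_cases h : d.contains v = true
  · simp [h]
  · have hany : (d.items.any fun p => p.1 == v) = false := Bool.eq_false_iff.mpr h
    have hne : ∀ p ∈ d.items, ¬ p.1 = v := by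
      intro p hp hc
      exact List.any_eq_false.mp hany p hp (beq_iff_eq.mpr hc)
    have hfind : d.items.find? (fun p => p.1 == v) = none := by
      apply List.find?_eq_none.mpr
      intro p hp; simpa using hne p hp
    have hmap : List.map (fun p : Int × Int => if p.1 = v then (v, (1:Int)) else p) d.items = d.items := by
      conv_rhs => rw [← List.map_id d.items]
      apply List.map_congr_left
      intro p hp; simp [hne p hp]
    simp only [h]
    simp [PySem.Dict.modify, PySem.Dict.insert, PySem.Dict.getD, PySem.Dict.get?,
          PySem.Dict.contains, hany, hfind, List.find?_append, hmap]

theorem dictA_eq_counter (path : List Int) :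
    path.foldl
      (fun d val =>
        let d' := if d.contains val then d else d.insert val 0
        d'.modify val 0 (· + 1))
      PySem.Dict.empty = PySem.Dict.counter path := by
  rw [PySem.Dict.counter_eq_foldl]
  exact PySem.List.foldl_congr_mem _ _ _ _ (fun acc x _ => ins_modify acc x)

-- A's early-return odd-counting loop, characterised
theorem loop_eq (vs : List Int) : ∀ odd : Int, 0 ≤ odd → odd ≤ 1 →
    pathCheckLoop odd vs
      = decide (odd + (vs.countP (fun v => decide (PySem.Int.mod v 2 ≠ 0)) : Int) ≤ 1) := by
  induction vs with
  | nil =>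
    intro odd h0 h1
    simp only [pathCheckLoop, List.countP_nil]
    simp; omega
  | cons v rest ih =>
    intro odd h0 h1
    simp only [pathCheckLoop, List.countP_cons]
    by_cases hv : PySem.Int.mod v 2 ≠ 0
    · have hpv : (decide (PySem.Int.mod v 2 ≠ 0)) = true := decide_eq_true hv
      rw [if_pos hv]
      by_cases hgt : odd + 1 > 1
      · rw [if_pos hgt]
        symm
        rw [decide_eq_false_iff_not]
        simp only [hpv, if_true]
        push_cast
        omega
      · rw [if_neg hgt, ih (odd + 1) (by omega) (by omega)]
        simp only [decide_eq_decide, hpv, if_true]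
        push_cast
        omega
    · have hpv : (decide (PySem.Int.mod v 2 ≠ 0)) = false := decide_eq_false hv
      rw [if_neg hv, if_neg (by omega : ¬ odd > 1), ih odd h0 h1]
      simp only [decide_eq_decide, hpv]
      push_cast
      omega

-- B's toggle loop: result is nodup and holds exactly the values seen an odd number of times
theorem toggle_inv (path : List Int) : ∀ s : List Int, s.Nodup →
    (path.foldl
      (fun s val =>
        if PySem.Set.contains s val then PySem.Set.discard s val else PySem.Set.add s val)
      s).Nodup ∧
    ∀ x : Int,
      x ∈ path.foldl
        (fun s val =>
          if PySem.Set.contains s val then PySem.Set.discard s val else PySem.Set.add s val)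
        s
      ↔ ((x ∈ s) ↔ path.count x % 2 = 0) := by
  induction path with
  | nil =>
    intro s hs
    refine ⟨hs, fun x => ?_⟩
    simp [List.count_nil]
  | cons v rest ih =>
    intro s hs
    have hs' : (if PySem.Set.contains s v then PySem.Set.discard s v else PySem.Set.add s v).Nodup := by
      by_cases h : PySem.Set.contains s v = true
      · rw [if_pos h]; exact PySem.Set.nodup_discard s v hs
      · rw [if_neg h]; exact PySem.Set.nodup_add s v hs
    have hmem : ∀ x : Int,
        x ∈ (if PySem.Set.contains s v then PySem.Set.discard s v else PySem.Set.add s v)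
          ↔ (if x = v then ¬ (x ∈ s) else x ∈ s) := by
      intro x
      by_cases h : PySem.Set.contains s v = true
      · have hvs : v ∈ s := (PySem.Set.contains_iff s v).mp h
        rw [if_pos h, PySem.Set.mem_discard]
        by_cases hx : x = v
        · subst hx; simp [hvs]
        · simp [hx]
      · have hvs : ¬ v ∈ s := fun hc => h ((PySem.Set.contains_iff s v).mpr hc)
        rw [if_neg h, PySem.Set.mem_add]
        by_cases hx : x = v
        · subst hx; simp [hvs]
        · simp [hx]
    obtain ⟨hn, hm⟩ := ih _ hs'
    rw [List.foldl_cons]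
    refine ⟨hn, fun x => ?_⟩
    rw [hm x, hmem x]
    by_cases hx : x = v
    · subst hx
      rw [if_pos rfl, List.count_cons_self]
      have hpar : ((List.count x rest + 1) % 2 = 0) ↔ ¬ (List.count x rest % 2 = 0) := by omega
      tauto
    · rw [if_neg hx]
      have hvx : ¬ v = x := fun h => hx h.symm
      simp [hvx]

-- counting odd values over the distinct elements of path
theorem countP_odd_eq (path : List Int) :
    ((PySem.Set.ofList path).countP
        (fun k => decide (PySem.Int.mod ((path.count k : Nat) : Int) 2 ≠ 0)) : Nat)
      = ((PySem.Set.ofList path).filter (fun k => decide (path.count k % 2 = 1))).length := by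
  rw [List.countP_eq_length_filter]
  congr 1
  apply List.filter_congr
  intro k _
  rw [PySem.Int.mod_eq_emod_of_pos (by norm_num : (0:Int) < 2)]
  simp only [decide_eq_decide]
  omega

theorem pathCheck_eq (path : List Int) : pathCheck path = pathCheck_alt path := by
  -- A's value, characterised
  have hvals : (PySem.Dict.counter path).values
      = (PySem.Set.ofList path).map (fun k => ((path.count k : Nat) : Int)) := by
    simp [PySem.Dict.values, PySem.Dict.items_counter, List.map_map, Function.comp_def]
  have hA : pathCheck path
      = decide ((((PySem.Set.ofList path).countP
          (fun k => decide (PySem.Int.mod ((path.count k : Nat) : Int) 2 ≠ 0))) : Int) ≤ 1) := by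
    unfold pathCheck
    rw [dictA_eq_counter]
    show pathCheckLoop 0 (PySem.Dict.counter path).values = _
    rw [hvals, loop_eq _ 0 le_rfl (by norm_num), List.countP_map]
    simp only [Function.comp_def, zero_add]
  -- B's value, characterised
  obtain ⟨hn, hm⟩ := toggle_inv path [] List.nodup_nil
  have hFnodup : ((PySem.Set.ofList path).filter
      (fun k => decide (path.count k % 2 = 1))).Nodup :=
    (PySem.Set.nodup_ofList path).filter _
  have hperm : (path.foldl
      (fun s val =>
        if PySem.Set.contains s val then PySem.Set.discard s val else PySem.Set.add s val)
      ([] : List Int)).Perm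
      ((PySem.Set.ofList path).filter (fun k => decide (path.count k % 2 = 1))) := by
    rw [List.perm_ext_iff_of_nodup hn hFnodup]
    intro a
    rw [hm a, List.mem_filter, PySem.Set.mem_ofList]
    constructor
    · intro h
      have hodd : List.count a path % 2 = 1 := by
        have := h.mpr
        by_contra hc
        have h0 := this (by omega)
        simp at h0
      have hmem : a ∈ path := by
        have hne : List.count a path ≠ 0 := by omega
        exact List.count_pos_iff.mp (Nat.pos_of_ne_zero hne)
      exact ⟨hmem, by simpa using hodd⟩
    · rintro ⟨_, h2⟩
      simp only [decide_eq_true_eq] at h2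
      simp only [List.not_mem_nil, false_iff]
      omega
  have hlen := hperm.length_eq
  rw [hA]
  unfold pathCheck_alt
  simp only [PySem.Set.len, PySem.Set.empty]
  rw [countP_odd_eq]
  simp only [hlen]

-- ===== VERDICT (by name: the statement is the Claim_ definition above) =====
theorem pathCheck_spec : Claim_equal_pathCheck := by
  intro path _
  unfold Spec_pathCheck
  exact pathCheck_eq path
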